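-- pv_equiv track=rewrite | github.com/Vechtomov/leetcode | p1461.py | generate_s
-- ===== SOURCE A (Python) =====
-- from itertools import combinations
--
-- def generate_s(k: int):
--     arr = list(range(k))
--     for i in range(k+1):
--         for comb in combinations(arr, i):
--             line = ['0'] * k
--             for j in comb:
--                 line[j] = '1'
--             yield ''.join(line)
-- ===== SOURCE B (Python) =====
-- def generate_s(k: int):
--     # Recursive prefix construction: strings of length n with exactly i ones,
--     # in the same order as lexicographic combinations of positions.
--     def S(n, i):
--         if i < 0 or i > n:
--             return []
--         if n == 0:
--             return ['']
--         return ['1' + t for t in S(n - 1, i - 1)] + ['0' + t for t in S(n - 1, i)]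
--     for i in range(k + 1):
--         yield from S(k, i)
-- ===== Notes on version B (the rewrite author's own statement) =====
-- stated objective: alternative
-- what changed: Replaces itertools.combinations over position lists plus per-string position-setting with a direct recursive prefix construction ('1'+rest / '0'+rest) of the strings with a given popcount.
import Mathlib
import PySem

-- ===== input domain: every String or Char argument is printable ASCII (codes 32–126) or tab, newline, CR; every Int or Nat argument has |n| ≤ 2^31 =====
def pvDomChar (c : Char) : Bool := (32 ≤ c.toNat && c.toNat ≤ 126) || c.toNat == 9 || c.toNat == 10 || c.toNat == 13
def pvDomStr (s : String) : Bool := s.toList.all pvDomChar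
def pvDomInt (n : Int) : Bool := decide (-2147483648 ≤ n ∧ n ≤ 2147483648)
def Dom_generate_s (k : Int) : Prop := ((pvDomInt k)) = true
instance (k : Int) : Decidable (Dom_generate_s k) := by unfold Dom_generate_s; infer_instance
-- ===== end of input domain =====

-- B replaces itertools.combinations + position-setting by a recursive prefix construction of the strings; objective: alternative.
-- A is a generator; both ports return the list of yielded values.

-- ===== PORT A =====
-- port of itertools.combinations(xs, i): i-element tuples in lexicographic order
def combosA : List Int → Nat → List (List Int)
  | _, 0 => [[]]
  | [], _ + 1 => []
  | x :: xs, i + 1 => (combosA xs i).map (fun c => x :: c) ++ combosA xs (i + 1)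

def generate_s (k : Int) : List String :=
  let arr := PySem.List.pyRange 0 k 1
  (PySem.List.pyRange 0 (k + 1) 1).flatMap (fun i =>
    (combosA arr i.toNat).map (fun comb =>
      -- line = ['0']*k; for j in comb: line[j] = '1'  (j is always in range here,
      -- since comb ⊆ range(k), so List.set with j.toNat is exact)
      String.mk (comb.foldl (fun line j => line.set j.toNat '1') (List.replicate k.toNat '0'))))

-- ===== PORT B =====
-- strings of length n with exactly i ones, in combination order (Source B's S)
def altS : Nat → Int → List (List Char)
  | 0, i => if i < 0 ∨ ((0 : Nat) : Int) < i then [] else [[]]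
  | m + 1, i =>
    if i < 0 ∨ ((m + 1 : Nat) : Int) < i then []
    else ((altS m (i - 1)).map (fun t => '1' :: t)) ++ ((altS m i).map (fun t => '0' :: t))

def generate_s_alt (k : Int) : List String :=
  (PySem.List.pyRange 0 (k + 1) 1).flatMap (fun i => (altS k.toNat i).map String.mk)

-- ===== PRECONDITION & SPEC =====
def Spec_generate_s (k : Int) (out : List String) : Prop := out = generate_s_alt k
instance (k : Int) (out : List String) : Decidable (Spec_generate_s k out) := by unfold Spec_generate_s; infer_instance

-- ===== CLAIM (what is proved, stated in full; the proofs are below) =====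
def Claim_equal_generate_s : Prop := ∀ (k : Int), Dom_generate_s k → Spec_generate_s k (generate_s k)

-- ===== LEMMAS AND PROOFS =====

theorem combosA_nil_of_lt {xs : List Int} : ∀ {i : Nat}, xs.length < i → combosA xs i = [] := by
  induction xs with
  | nil => intro i h; cases i with
    | zero => omega
    | succ j => rfl
  | cons x xs ih =>
    intro i h
    cases i with
    | zero => simp at h
    | succ j =>
      simp only [List.length_cons] at h
      rw [combosA, ih (i := j) (by omega), ih (i := j + 1) (by omega)]
      rfl

theorem mem_combosA {xs : List Int} : ∀ {i : Nat} {c : List Int}, c ∈ combosA xs i → ∀ j ∈ c, j ∈ xs := by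
  induction xs with
  | nil =>
    intro i c hc j hj
    cases i with
    | zero => simp [combosA] at hc; simp [hc] at hj
    | succ m => simp [combosA] at hc
  | cons x xs ih =>
    intro i c hc j hj
    cases i with
    | zero =>
      simp [combosA] at hc; simp [hc] at hj
    | succ m =>
      simp only [combosA, List.mem_append, List.mem_map] at hc
      rcases hc with ⟨c', hc', rfl⟩ | hc
      · rcases List.mem_cons.mp hj with rfl | hj
        · simp
        · exact List.mem_cons_of_mem _ (ih hc' j hj)
      · exact List.mem_cons_of_mem _ (ih hc j hj)

theorem combosA_map_add_one (xs : List Int) : ∀ (i : Nat),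
    combosA (xs.map (· + 1)) i = (combosA xs i).map (List.map (· + 1)) := by
  induction xs with
  | nil => intro i; cases i <;> simp [combosA]
  | cons x xs ih =>
    intro i
    cases i with
    | zero => simp [combosA]
    | succ m =>
      simp [combosA, ih m, ih (m + 1), Function.comp]

theorem shift_fold (h : Char) (t : List Char) :
    ∀ (c : List Int), (∀ j ∈ c, 0 ≤ j) →
    (c.map (· + 1)).foldl (fun line j => line.set j.toNat '1') (h :: t)
      = h :: c.foldl (fun line j => line.set j.toNat '1') t := by
  intro c
  induction c generalizing t with
  | nil => intro _; rfl
  | cons j c ih =>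
    intro hpos
    have hj : 0 ≤ j := hpos j (List.mem_cons_self)
    have : (j + 1).toNat = j.toNat + 1 := by omega
    simp only [List.map_cons, List.foldl_cons, this, List.set]
    exact ih _ (fun x hx => hpos x (List.mem_cons_of_mem _ hx))

theorem altS_neg_one : ∀ n : Nat, altS n (-1) = [] := by
  intro n
  cases n <;> simp [altS]

theorem altS_zero : ∀ n : Nat, altS n 0 = [List.replicate n '0'] := by
  intro n
  induction n with
  | zero => simp [altS]
  | succ m ih =>
    simp [altS, altS_neg_one, ih, List.replicate_succ]
    omega

-- index list of A: list(range(n)) as Ints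
def idxL (n : Nat) : List Int := (List.range n).map Int.ofNat

theorem idxL_succ (n : Nat) : idxL (n + 1) = 0 :: (idxL n).map (· + 1) := by
  have hf : Int.ofNat ∘ Nat.succ = (fun x : Int => x + 1) ∘ Int.ofNat := by
    funext a
    show Int.ofNat (a + 1) = Int.ofNat a + 1
    rfl
  simp only [idxL, List.range_succ_eq_map, List.map_cons, List.map_map, hf]
  rfl

theorem idxL_nonneg (n : Nat) : ∀ j ∈ idxL n, 0 ≤ j := by
  intro j hj
  unfold idxL at hj
  simp only [List.mem_map] at hj
  obtain ⟨m, _, rfl⟩ := hj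
  exact Int.natCast_nonneg m

-- main bridge: A's per-popcount block equals B's altS
theorem main_bridge : ∀ (n : Nat) (i : Nat),
    (combosA (idxL n) i).map
      (fun comb => comb.foldl (fun line j => line.set j.toNat '1') (List.replicate n '0'))
      = altS n (i : Int) := by
  intro n
  induction n with
  | zero =>
    intro i
    cases i with
    | zero => simp [combosA, altS, idxL]
    | succ m =>
      rw [show idxL 0 = [] from rfl]
      rw [combosA_nil_of_lt (by simp)]
      rw [altS]
      simp
  | succ n ih =>
    intro i
    cases i with
    | zero =>
      simp [combosA, altS_zero]
    | succ m =>
      by_cases hm : m ≤ n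
      · rw [idxL_succ, combosA]
        rw [combosA_map_add_one, combosA_map_add_one]
        rw [List.map_append]
        simp only [List.map_map]
        have build1 : ∀ c ∈ combosA (idxL n) m,
            ((fun comb => comb.foldl (fun line j => line.set j.toNat '1') (List.replicate (n+1) '0')) ∘
              (fun c => 0 :: c) ∘ List.map (· + 1)) c
            = '1' :: c.foldl (fun line j => line.set j.toNat '1') (List.replicate n '0') := by
          intro c hc
          have hpos : ∀ j ∈ c, 0 ≤ j := fun j hj => idxL_nonneg n j (mem_combosA hc j hj)
          simp only [Function.comp, List.replicate, List.foldl_cons]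
          rw [show ((0 : Int)).toNat = 0 from rfl, List.set]
          exact shift_fold _ _ c hpos
        have build0 : ∀ c ∈ combosA (idxL n) (m + 1),
            ((fun comb => comb.foldl (fun line j => line.set j.toNat '1') (List.replicate (n+1) '0')) ∘
              List.map (· + 1)) c
            = '0' :: c.foldl (fun line j => line.set j.toNat '1') (List.replicate n '0') := by
          intro c hc
          have hpos : ∀ j ∈ c, 0 ≤ j := fun j hj => idxL_nonneg n j (mem_combosA hc j hj)
          simp only [Function.comp, List.replicate]
          exact shift_fold _ _ c hpos
        rw [List.map_congr_left build1, List.map_congr_left build0]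
        rw [show altS (n+1) ((m+1 : Nat) : Int)
              = ((altS n ((m+1 : Nat) - 1)).map (fun t => '1' :: t))
                ++ ((altS n ((m+1 : Nat) : Int)).map (fun t => '0' :: t)) from by
          rw [altS]; rw [if_neg (by push_cast; omega)]]
        rw [show ((m+1 : Nat) : Int) - 1 = (m : Int) from by push_cast; omega]
        rw [← ih m, ← ih (m + 1)]
        simp only [List.map_map, Function.comp_def]
      · have hlen : (idxL (n+1)).length < m + 1 := by
          unfold idxL; simp; omega
        rw [combosA_nil_of_lt hlen]
        rw [altS, if_pos (by push_cast; omega)]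
        rfl

theorem pyRange_toNat_map (a : Int) (h : 0 ≤ a) : PySem.List.pyRange 0 a 1 = idxL a.toNat := by
  rw [PySem.List.pyRange_one]
  unfold idxL
  simp only [sub_zero, zero_add]
  rfl

-- ===== VERDICT (by name: the statement is the Claim_ definition above) =====
theorem generate_s_spec : Claim_equal_generate_s := by
  intro k _
  unfold Spec_generate_s generate_s generate_s_alt
  by_cases hk : 0 ≤ k
  · rw [pyRange_toNat_map k hk, pyRange_toNat_map (k + 1) (by omega),
        show idxL (k + 1).toNat = (List.range (k + 1).toNat).map Int.ofNat from rfl,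
        List.flatMap_map, List.flatMap_map]
    congr 1
    funext n
    show (combosA (idxL k.toNat) n).map
        (fun comb => String.mk (comb.foldl (fun line j => line.set j.toNat '1') (List.replicate k.toNat '0')))
      = (altS k.toNat ((n : Nat) : Int)).map String.mk
    rw [← main_bridge k.toNat n, List.map_map]
    rfl
  · rw [show PySem.List.pyRange 0 (k+1) 1 = [] from PySem.List.pyRange_one_eq_nil (by omega)]
    rfl
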